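-- pv_equiv track=rewrite | github.com/vindarten/tutoring_ege_inf | Python/Task23/n18503.py | R
-- ===== SOURCE A (Python) =====
-- def R(n, k, y):
-- 	if n == y:
-- 		return 0
-- 	elif n == k:
-- 		return 1
-- 	elif n > k:
-- 		return 0
-- 	else:
-- 		return R(n + 1, k, y) + R(n + 2, k, y) + R(n * 3, k, y)
-- ===== SOURCE B (Python) =====
-- def R(n, k, y):
--     if n == y:
--         return 0
--     if n >= k:
--         return 1 if n == k else 0
--     f = {}
--     for m in range(k, n - 1, -1):
--         if m == y:
--             v = 0
--         elif m == k:
--             v = 1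
--         else:
--             v = f.get(m + 1, 0) + f.get(m + 2, 0) + f.get(m * 3, 0)
--         f[m] = v
--     return f[n]
-- ===== Notes on version B (the rewrite author's own statement) =====
-- stated objective: alternative
-- what changed: Replaces the exponential three-way recursion by an iterative bottom-up table f[m] filled from k down to n, computing each state once (a timing run could not confirm a speed-up at the generated sizes, so none is claimed).
-- outside the precondition, e.g. on R(-1, 0, -3): A returns 1, B returns 1
import Mathlib
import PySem

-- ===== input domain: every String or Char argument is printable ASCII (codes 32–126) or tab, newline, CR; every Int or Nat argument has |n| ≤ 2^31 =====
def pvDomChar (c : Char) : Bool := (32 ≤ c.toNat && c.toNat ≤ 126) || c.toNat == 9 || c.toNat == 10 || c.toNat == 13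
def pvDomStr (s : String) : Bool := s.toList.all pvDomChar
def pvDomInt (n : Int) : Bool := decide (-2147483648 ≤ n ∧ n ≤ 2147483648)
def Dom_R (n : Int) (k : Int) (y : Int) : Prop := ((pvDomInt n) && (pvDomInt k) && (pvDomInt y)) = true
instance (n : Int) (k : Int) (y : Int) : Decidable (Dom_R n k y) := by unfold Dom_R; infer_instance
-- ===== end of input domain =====

-- B replaces A's exponential three-way recursion with an iterative bottom-up table filled from k down to n (each state computed once; no speed claim is made).


-- ===== PORT A =====
-- Literal transliteration of A's recursion; the Nat fuel only makes the recursion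
-- total in Lean (it is never exhausted on inputs satisfying Pre_R).
def Rgo : Nat → Int → Int → Int → Int
  | 0, _, _, _ => 0
  | fuel + 1, n, k, y =>
    if n = y then 0
    else if n = k then 1
    else if n > k then 0
    else Rgo fuel (n + 1) k y + Rgo fuel (n + 2) k y + Rgo fuel (n * 3) k y

def R (n : Int) (k : Int) (y : Int) : Int := Rgo ((k - n).toNat + 1) n k y

-- ===== PORT B =====
def Rstep (k : Int) (y : Int) (d : PySem.Dict Int Int) (m : Int) : PySem.Dict Int Int :=
  d.insert m
    (if m = y then 0
     else if m = k then 1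
     else d.getD (m + 1) 0 + d.getD (m + 2) 0 + d.getD (m * 3) 0)

def R_alt (n : Int) (k : Int) (y : Int) : Int :=
  if n = y then 0
  else if n ≥ k then (if n = k then 1 else 0)
  else
    ((PySem.List.pyRange k (n - 1) (-1)).foldl (Rstep k y) PySem.Dict.empty).getD n 0

-- ===== PRECONDITION & SPEC =====
-- Pre_R excludes n ≤ 0 with n < k and n ≠ y: there the n*3 branch does not progress and
-- A's recursion is (apart from rare points where y cuts every infinite path) non-terminating
-- (RecursionError); B's forward table is not claimed to match A on those rare points.
def Pre_R (n : Int) (k : Int) (y : Int) : Prop := 1 ≤ n ∨ n = y ∨ k ≤ n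
instance (n : Int) (k : Int) (y : Int) : Decidable (Pre_R n k y) := by unfold Pre_R; infer_instance

def pvWitness_R : Int × Int × Int := (1, 6, 4)

def Spec_R (n : Int) (k : Int) (y : Int) (out : Int) : Prop := out = R_alt n k y
instance (n : Int) (k : Int) (y : Int) (out : Int) : Decidable (Spec_R n k y out) := by unfold Spec_R; infer_instance

-- ===== CLAIM (what is proved, stated in full; the proofs are below) =====
def Claim_equal_R : Prop := ∀ (n : Int) (k : Int) (y : Int), Dom_R n k y → Pre_R n k y → Spec_R n k y (R n k y)

-- ===== LEMMAS AND PROOFS =====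

-- Proof-side reference function: the mathematical value of the count, defined by
-- well-founded recursion (the 1 ≤ n guard is what makes the measure decrease).
def G (n : Int) (k : Int) (y : Int) : Int :=
  if n = y then 0
  else if n = k then 1
  else if n > k then 0
  else if _h : 1 ≤ n then G (n + 1) k y + G (n + 2) k y + G (n * 3) k y
  else 0
termination_by (k - n).toNat
decreasing_by
  · omega
  · omega
  · have : n * 3 ≥ n + 2 := by nlinarith
    omega

theorem G_of_gt {n k y : Int} (h : k < n) : G n k y = 0 := by
  unfold G
  have h1 : n ≠ k := by omega
  simp [h1, h]

theorem Rgo_eq_G (k y : Int) : ∀ (fuel : Nat) (n : Int),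
    (1 ≤ n ∨ n = y ∨ k ≤ n) → (k - n).toNat + 1 ≤ fuel → Rgo fuel n k y = G n k y := by
  intro fuel
  induction fuel with
  | zero => intro n _ hf; exact absurd hf (by omega)
  | succ f ih =>
    intro n hpre hfuel
    rw [Rgo]
    by_cases hy : n = y
    · rw [G]; simp [hy]
    by_cases hk : n = k
    · rw [G]; simp [hk]
    by_cases hgt : n > k
    · rw [G]; simp [hy, hk, hgt]
    · -- recursive case: n < k, so Pre forces 1 ≤ n
      have hn1 : 1 ≤ n := by rcases hpre with h | h | h <;> omega
      rw [G]
      simp only [if_neg hy, if_neg hk, if_neg hgt, dif_pos hn1]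
      rw [ih (n + 1) (by omega) (by omega), ih (n + 2) (by omega) (by omega),
        ih (n * 3) (by omega) (by omega)]

-- One iteration of B's loop: inserting the value for key a extends the region
-- on which the table agrees with G from (a, ∞) to (a-1, ∞).
theorem step_correct (k y : Int) (d : PySem.Dict Int Int) (a : Int) (h1 : 1 ≤ a)
    (hak : a ≤ k) (hd : ∀ j, a < j → d.getD j 0 = G j k y) :
    ∀ j, a - 1 < j → (Rstep k y d a).getD j 0 = G j k y := by
  intro j hj
  rw [Rstep, PySem.Dict.getD_insert]
  by_cases hja : j = a
  · rw [if_pos hja, hja]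
    by_cases hy : a = y
    · rw [G]; simp [hy]
    by_cases hke : a = k
    · rw [G]; simp [hke]
    · have hgt : ¬ a > k := by omega
      rw [G]
      simp only [if_neg hy, if_neg hke, if_neg hgt, dif_pos h1]
      rw [hd (a + 1) (by omega), hd (a + 2) (by omega), hd (a * 3) (by omega)]
  · rw [if_neg hja]
    exact hd j (by omega)

-- Invariant of B's fold: processing m = t-1+c down to t turns "table correct above t-1+c"
-- into "table correct above t-1".
theorem fold_inv (k y t : Int) (ht : 1 ≤ t) :
    ∀ (c : Nat) (d : PySem.Dict Int Int), t - 1 + c ≤ k →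
      (∀ j, t - 1 + c < j → d.getD j 0 = G j k y) →
      ∀ j, t - 1 < j →
        ((PySem.List.pyRange (t - 1 + c) (t - 1) (-1)).foldl (Rstep k y) d).getD j 0 = G j k y := by
  intro c
  induction c with
  | zero =>
    intro d _ hd j hj
    rw [PySem.List.pyRange_neg_one_eq_nil (by omega)]
    simpa using hd j (by omega)
  | succ c ih =>
    intro d hak hd j hj
    rw [PySem.List.pyRange_neg_one_cons (show (t : Int) - 1 < t - 1 + (c + 1 : Nat) by push_cast; omega)]
    simp only [List.foldl_cons]
    have hstep := step_correct k y d (t - 1 + (c + 1 : Nat)) (by push_cast; omega) hak hd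
    have hrw : (t : Int) - 1 + (c + 1 : Nat) - 1 = t - 1 + (c : Nat) := by push_cast; omega
    rw [hrw] at hstep
    rw [hrw]
    exact ih _ (by push_cast at hak ⊢; omega) hstep j hj

theorem Ralt_eq_G (n k y : Int) (hpre : Pre_R n k y) : R_alt n k y = G n k y := by
  rw [R_alt]
  by_cases hy : n = y
  · rw [G]; simp [hy]
  by_cases hge : n ≥ k
  · rw [if_neg hy, if_pos hge]
    by_cases hk : n = k
    · subst hk; rw [G]; simp [hy]
    · have hgt : n > k := by omega
      rw [if_neg hk, G_of_gt hgt]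
  · have hn1 : 1 ≤ n := by rcases hpre with h | h | h <;> omega
    rw [if_neg hy, if_neg hge]
    have h := fold_inv k y n hn1 (k - n + 1).toNat PySem.Dict.empty (by omega)
      (by intro j hj
          rw [PySem.Dict.getD_empty, G_of_gt (by omega)])
      n (by omega)
    rw [show n - 1 + ((k - n + 1).toNat : Int) = k by omega] at h
    exact h

-- ===== VERDICT (by name: the statement is the Claim_ definition above) =====
theorem R_spec : Claim_equal_R := by
  intro n k y _ hpre
  unfold Spec_R
  rw [R, Rgo_eq_G k y _ n hpre (by omega), Ralt_eq_G n k y hpre]
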